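-- pv_equiv track=rewrite | github.com/xlistarer/homework6 | main.py | count_total_price
-- ===== SOURCE A (Python) =====
-- def count_total_price(price, count):
--     first=set((price.keys()))
--     second=set((count.keys()))
--     all=list(first&second)
--     summ=0
--     for i in range(len(all)):
--         summ+=price[all[i]]*count[all[i]]
--     return summ
-- ===== SOURCE B (Python) =====
-- def count_total_price(price, count):
--     ps = sorted(price.items(), key=lambda kv: kv[0])
--     cs = sorted(count.items(), key=lambda kv: kv[0])
--     total = 0
--     i = 0
--     j = 0
--     while i < len(ps) and j < len(cs):
--         if ps[i][0] < cs[j][0]: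
--             i += 1
--         elif cs[j][0] < ps[i][0]:
--             j += 1
--         else:
--             total += ps[i][1] * cs[j][1]
--             i += 1
--             j += 1
--     return total
-- ===== Notes on version B (the rewrite author's own statement) =====
-- stated objective: alternative
-- what changed: Replaces A's set-intersection-then-index-loop with a sort-and-merge: both item lists are sorted by key and a two-pointer merge scan accumulates value*count on matching keys, with no set and no dict lookup in the loop.
import Mathlib
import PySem

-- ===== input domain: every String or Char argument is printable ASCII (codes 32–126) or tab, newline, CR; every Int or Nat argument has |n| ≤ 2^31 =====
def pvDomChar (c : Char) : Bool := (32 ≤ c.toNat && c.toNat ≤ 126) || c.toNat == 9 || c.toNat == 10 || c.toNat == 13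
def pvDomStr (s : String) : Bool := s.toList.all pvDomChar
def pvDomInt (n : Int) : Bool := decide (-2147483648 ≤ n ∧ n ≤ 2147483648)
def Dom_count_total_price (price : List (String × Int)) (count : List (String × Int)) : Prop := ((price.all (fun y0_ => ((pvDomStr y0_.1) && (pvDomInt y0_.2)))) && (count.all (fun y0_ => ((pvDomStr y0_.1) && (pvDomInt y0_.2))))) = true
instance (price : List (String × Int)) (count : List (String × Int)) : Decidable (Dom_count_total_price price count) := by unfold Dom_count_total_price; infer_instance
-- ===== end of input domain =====

-- B replaces A's set-intersection + index-loop with sort-by-key and a two-pointer merge scan (alternative algorithm, same exact integer result).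

-- ===== PORT A =====
def count_total_price (price : List (String × Int)) (count : List (String × Int)) : Int :=
  let first := PySem.Set.ofList (PySem.Dict.keys (PySem.Dict.mk price))
  let second := PySem.Set.ofList (PySem.Dict.keys (PySem.Dict.mk count))
  let all := PySem.Set.inter first second
  (PySem.List.pyRange 0 (PySem.List.len all) 1).foldl
    (fun summ i =>
      -- price[all[i]] * count[all[i]]: all[i] is in range and its key is in both dicts, so
      -- the IndexError/KeyError branches (pyGetD default, get? = none) are unreachable
      summ + ((PySem.Dict.mk price).get? (PySem.List.pyGetD all i "")).getD 0
               * ((PySem.Dict.mk count).get? (PySem.List.pyGetD all i "")).getD 0)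
    0

-- ===== PORT B =====
-- Source B's while loop over indices i, j, ported as the obvious structural recursion on the two suffixes
def pvMergeScan (total : Int) : List (String × Int) → List (String × Int) → Int
  | (k1, v1) :: pt, (k2, v2) :: ct =>
    if k1 < k2 then pvMergeScan total pt ((k2, v2) :: ct)
    else if k2 < k1 then pvMergeScan total ((k1, v1) :: pt) ct
    else pvMergeScan (total + v1 * v2) pt ct
  | _, _ => total
  termination_by ps cs => ps.length + cs.length

def count_total_price_alt (price : List (String × Int)) (count : List (String × Int)) : Int :=
  let ps := PySem.List.sorted ((PySem.Dict.mk price).items) (fun kv => kv.1) false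
  let cs := PySem.List.sorted ((PySem.Dict.mk count).items) (fun kv => kv.1) false
  pvMergeScan 0 ps cs

-- ===== PRECONDITION & SPEC =====
-- Pre_ excludes only association lists with a repeated key (in price or count): such lists do not
-- represent a Python dict (A's argument type), so A never receives them; it excludes no input A returns on.
def Pre_count_total_price (price : List (String × Int)) (count : List (String × Int)) : Prop :=
  (price.map Prod.fst).Nodup ∧ (count.map Prod.fst).Nodup
instance (price : List (String × Int)) (count : List (String × Int)) : Decidable (Pre_count_total_price price count) := by unfold Pre_count_total_price; infer_instance

def pvWitness_count_total_price : (List (String × Int)) × (List (String × Int)) :=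
  ([("a", 2), ("b", 3)], [("a", 5), ("c", 1)])

def Spec_count_total_price (price : List (String × Int)) (count : List (String × Int)) (out : Int) : Prop := out = count_total_price_alt price count
instance (price : List (String × Int)) (count : List (String × Int)) (out : Int) : Decidable (Spec_count_total_price price count out) := by unfold Spec_count_total_price; infer_instance

-- ===== CLAIM (what is proved, stated in full; the proofs are below) =====
def Claim_equal_count_total_price : Prop := ∀ (price : List (String × Int)) (count : List (String × Int)), Dom_count_total_price price count → Pre_count_total_price price count → Spec_count_total_price price count (count_total_price price count)

-- ===== LEMMAS AND PROOFS =====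

-- canonical value both sides are reduced to: sum over price of v * (count lookup, 0 if absent)
def pvCanon (price count : List (String × Int)) : Int :=
  (price.map (fun kv => kv.2 * ((PySem.Dict.mk count).get? kv.1).getD 0)).sum

-- a key absent from count looks up to none
lemma pv_get_none {count : List (String × Int)} {k : String}
    (h : k ∉ count.map Prod.fst) : (PySem.Dict.mk count).get? k = none := by
  rw [PySem.Dict.get?_eq_none_iff_not_mem_keys]; exact h

-- lookup in a key-nodup association list only depends on the set of items
lemma pv_get_perm {cs count : List (String × Int)} (hp : cs.Perm count)
    (hn : (count.map Prod.fst).Nodup) (k : String) :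
    (PySem.Dict.mk cs).get? k = (PySem.Dict.mk count).get? k := by
  have hn' : ((PySem.Dict.mk cs).keys).Nodup := (hp.map Prod.fst).nodup_iff.2 hn
  cases h : (PySem.Dict.mk count).get? k with
  | some v =>
    have : (k, v) ∈ (PySem.Dict.mk count).items := PySem.Dict.mem_items_of_get?_eq_some _ h
    exact (PySem.Dict.get?_eq_some_iff_mem_items _ _ v hn').2 (hp.mem_iff.2 this)
  | none =>
    rw [PySem.Dict.get?_eq_none_iff_not_mem_keys] at h ⊢
    exact fun hk => h ((hp.map Prod.fst).mem_iff.1 hk)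

-- the merge scan on strictly key-sorted lists computes the canonical sum
lemma pv_merge_spec : ∀ (t : Int) (ps cs : List (String × Int)),
    ps.Pairwise (fun a b => a.1 < b.1) → cs.Pairwise (fun a b => a.1 < b.1) →
    pvMergeScan t ps cs = t + pvCanon ps cs := by
  intro t ps cs
  fun_induction pvMergeScan t ps cs with
  | case1 t k1 v1 pt k2 v2 ct hlt ih =>
    intro hps hcs
    rw [ih (List.Pairwise.of_cons hps) hcs]
    have habs : k1 ∉ ((k2, v2) :: ct).map Prod.fst := by
      simp only [List.map_cons, List.mem_cons]
      rintro (h | h)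
      · exact absurd (h ▸ hlt) (lt_irrefl _)
      · rcases List.mem_map.1 h with ⟨kv, hkv, hk⟩
        have := (List.pairwise_cons.1 hcs).1 kv hkv
        exact absurd (lt_trans hlt (hk ▸ this)) (lt_irrefl _)
    simp [pvCanon, pv_get_none habs]
  | case2 t k1 v1 pt k2 v2 ct hlt hgt ih =>
    intro hps hcs
    rw [ih hps (List.Pairwise.of_cons hcs)]
    have hne : ∀ kv ∈ (k1, v1) :: pt, ¬ (k2 = kv.1) := by
      rintro kv hkv rfl
      rcases List.mem_cons.1 hkv with rfl | h
      · exact absurd hgt (lt_irrefl _)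
      · exact absurd (lt_trans hgt ((List.pairwise_cons.1 hps).1 kv h)) (lt_irrefl _)
    congr 1
    unfold pvCanon
    congr 1
    refine List.map_congr_left ?_
    intro kv hkv
    rw [PySem.Dict.get?_mk_cons]
    simp [hne kv hkv]
  | case3 t k1 v1 pt k2 v2 ct hlt hgt ih =>
    intro hps hcs
    have heq : k1 = k2 := le_antisymm (not_lt.1 hgt) (not_lt.1 hlt)
    subst heq
    rw [ih (List.Pairwise.of_cons hps) (List.Pairwise.of_cons hcs)]
    have hne : ∀ kv ∈ pt, ¬ (k1 = kv.1) := by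
      rintro kv hkv rfl
      exact absurd ((List.pairwise_cons.1 hps).1 kv hkv) (lt_irrefl _)
    have hmap : pvCanon ((k1, v1) :: pt) ((k1, v2) :: ct) = v1 * v2 + pvCanon pt ct := by
      unfold pvCanon
      rw [List.map_cons, List.sum_cons, PySem.Dict.get?_mk_cons]
      simp only [beq_self_eq_true, if_true, Option.getD_some]
      congr 1
      congr 1
      refine List.map_congr_left ?_
      intro kv hkv
      rw [PySem.Dict.get?_mk_cons]
      simp [hne kv hkv]
    rw [hmap]; ring
  | case4 t ps cs h =>
    intro _ _
    rcases ps with _ | ⟨⟨k1,v1⟩, pt⟩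
    · simp [pvCanon]
    · rcases cs with _ | ⟨⟨k2,v2⟩, ct⟩
      · simp [pvCanon, PySem.Dict.get?]
      · exact (h k1 v1 pt k2 v2 ct rfl rfl).elim

-- dropping filtered-out keys costs nothing: their lookup is none, the term 0
lemma pv_sum_filter (xs : List String) (p : String → Bool) (f : String → Int)
    (h : ∀ x ∈ xs, p x = false → f x = 0) :
    ((xs.filter p).map f).sum = (xs.map f).sum := by
  induction xs with
  | nil => rfl
  | cons x xt ih =>
    rcases hx : p x with _ | _
    · simp [hx, h x (List.mem_cons_self) hx,
        ih (fun y hy => h y (List.mem_cons_of_mem _ hy))]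
    · simp [hx, ih (fun y hy => h y (List.mem_cons_of_mem _ hy))]

-- A's intersection loop computes the canonical sum
lemma pv_A_eq (price count : List (String × Int)) (hp : (price.map Prod.fst).Nodup) :
    count_total_price price count = pvCanon price count := by
  unfold count_total_price
  simp only []
  rw [PySem.List.foldl_pyRange_zero_pyGetD
        (PySem.Set.inter (PySem.Set.ofList (PySem.Dict.mk price).keys)
          (PySem.Set.ofList (PySem.Dict.mk count).keys)) ""
        (fun summ k => summ + ((PySem.Dict.mk price).get? k).getD 0
                         * ((PySem.Dict.mk count).get? k).getD 0) 0]
  rw [PySem.List.foldl_add]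
  have hkeysP : (PySem.Dict.mk price).keys = price.map Prod.fst := rfl
  simp only [PySem.Set.inter, hkeysP,
    PySem.Set.ofList_eq_self_of_nodup (price.map Prod.fst) hp, zero_add]
  rw [pv_sum_filter _ _ _ ?_]
  · rw [List.map_map]
    unfold pvCanon
    congr 1
    refine List.map_congr_left ?_
    intro kv hkv
    have hget : (PySem.Dict.mk price).get? kv.1 = some kv.2 :=
      PySem.Dict.get?_of_mem_items (PySem.Dict.mk price) (by exact hkv) hp
    simp [Function.comp, hget]
  · intro k hk hkf
    have : k ∉ count.map Prod.fst := by
      intro hmem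
      have hc := (PySem.Set.contains_iff ((PySem.Set.ofList (PySem.Dict.mk count).keys)) k).2
        ((PySem.Set.mem_ofList _ _).2 hmem)
      rw [hkf] at hc
      exact Bool.false_ne_true hc
    simp [pv_get_none this]

-- pairwise ≤ on keys plus distinct keys gives pairwise <
lemma pv_pairwise_lt (xs : List (String × Int))
    (hle : xs.Pairwise (fun a b => a.1 ≤ b.1)) (hn : (xs.map Prod.fst).Nodup) :
    xs.Pairwise (fun a b => a.1 < b.1) := by
  have hne : xs.Pairwise (fun a b => a.1 ≠ b.1) := (List.pairwise_map).1 hn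
  exact (hle.and hne).imp (fun h => lt_of_le_of_ne h.1 h.2)

-- B's sort-and-merge computes the canonical sum
lemma pv_B_eq (price count : List (String × Int))
    (hp : (price.map Prod.fst).Nodup) (hc : (count.map Prod.fst).Nodup) :
    count_total_price_alt price count = pvCanon price count := by
  unfold count_total_price_alt
  simp only []
  have hpermP : (PySem.List.sorted ((PySem.Dict.mk price).items) (fun kv => kv.1) false).Perm price :=
    PySem.List.sorted_perm _ _ _
  have hpermC : (PySem.List.sorted ((PySem.Dict.mk count).items) (fun kv => kv.1) false).Perm count :=
    PySem.List.sorted_perm _ _ _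
  rw [pv_merge_spec 0 _ _
    (pv_pairwise_lt _ (PySem.List.sorted_pairwise _ _) ((hpermP.map Prod.fst).nodup_iff.2 hp))
    (pv_pairwise_lt _ (PySem.List.sorted_pairwise _ _) ((hpermC.map Prod.fst).nodup_iff.2 hc)), zero_add]
  unfold pvCanon
  have hfun : (fun kv : String × Int => kv.2 *
      ((PySem.Dict.mk (PySem.List.sorted ((PySem.Dict.mk count).items) (fun kv => kv.1) false)).get? kv.1).getD 0)
      = (fun kv : String × Int => kv.2 * ((PySem.Dict.mk count).get? kv.1).getD 0) := by
    funext kv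
    rw [pv_get_perm hpermC hc kv.1]
  rw [hfun]
  exact (hpermP.map _).sum_eq

-- ===== VERDICT (by name: the statement is the Claim_ definition above) =====
theorem count_total_price_spec : Claim_equal_count_total_price := by
  intro price count _ hpre
  unfold Spec_count_total_price
  rw [pv_A_eq price count hpre.1, pv_B_eq price count hpre.1 hpre.2]
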